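-- pv_equiv track=rewrite | github.com/aaravmody/sem4pracs | POA/Page Replacement/py/All page replacement.py | farthest_index
-- ===== SOURCE A (Python) =====
-- def farthest_index(f,pages, startindex):
--         farthest_index = -1
--         farthest_dist = -1
--         for i, page in enumerate(f):
--             if page not in pages[startindex:]:
--                 return i
--             else:
--                 distance = pages[startindex:].index(page)
--                 if distance > farthest_dist:
--                     farthest_dist = distance
--                     farthest_index = i
--         return farthest_index
-- ===== SOURCE B (Python) =====
-- def farthest_index(f, pages, startindex):
--     # Scan the reference suffix once instead of scanning it per frame: cross
--     # off frame pages at their first occurrence; the page crossed off last is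
--     # the one used farthest in the future; pages never crossed off are unused.
--     remaining = set(f)
--     winner = None
--     for page in pages[startindex:]:
--         if not remaining:
--             break
--         if page in remaining:
--             remaining.discard(page)
--             winner = page
--     if remaining:
--         for i, page in enumerate(f):
--             if page in remaining:
--                 return i
--     return f.index(winner) if winner is not None else -1
-- ===== Notes on version B (the rewrite author's own statement) =====
-- stated objective: faster
-- what changed: B scans the reference suffix once, crossing frame pages off a set at their first occurrence (the page crossed off last is the farthest-used; pages never crossed off are unused), instead of A's per-frame membership test and .index scan over the rebuilt slice.
import Mathlib
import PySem

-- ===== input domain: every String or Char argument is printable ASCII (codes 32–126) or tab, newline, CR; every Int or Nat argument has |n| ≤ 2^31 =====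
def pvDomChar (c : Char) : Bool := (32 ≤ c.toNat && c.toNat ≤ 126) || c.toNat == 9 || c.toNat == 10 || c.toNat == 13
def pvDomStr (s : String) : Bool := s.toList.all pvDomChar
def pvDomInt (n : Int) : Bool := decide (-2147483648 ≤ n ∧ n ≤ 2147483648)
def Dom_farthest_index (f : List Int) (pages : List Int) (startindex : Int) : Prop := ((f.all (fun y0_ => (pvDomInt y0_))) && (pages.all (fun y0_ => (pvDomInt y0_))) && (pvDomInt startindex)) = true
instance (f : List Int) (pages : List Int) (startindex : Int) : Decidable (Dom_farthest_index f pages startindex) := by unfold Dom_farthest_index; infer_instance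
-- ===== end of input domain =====

-- B scans the reference suffix ONCE, crossing frame pages off a set at their first
-- occurrence (last crossed off = farthest-used), instead of A's per-frame .index scan
-- of the rebuilt slice (objective: faster).

-- ===== PORT A =====
-- A's loop over enumerate(f); the slice pages[startindex:] is recomputed each step as in the Python.
def fiLoopA : List Int → List Int → Int → Int → Int → Int → Int
  | [], _, _, _, fi, _ => fi
  | page :: rest, pages, st, i, fi, fd =>
    if ¬ (page ∈ PySem.List.slice pages (some st) none) then i
    else
      let distance : Int := ((PySem.List.index? (PySem.List.slice pages (some st) none) page).getD 0 : Nat)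
      if distance > fd then fiLoopA rest pages st (i + 1) i distance
      else fiLoopA rest pages st (i + 1) fi fd

def farthest_index (f : List Int) (pages : List Int) (startindex : Int) : Int :=
  fiLoopA f pages startindex 0 (-1) (-1)

-- ===== PORT B =====
-- the suffix scan: cross off members of the remaining set, record the page crossed off last
def fiScan : List Int → PySem.Set Int → Option Int → PySem.Set Int × Option Int
  | [], S, w => (S, w)
  | p :: rest, S, w =>
    if S.isEmpty then (S, w)                -- "if not remaining: break"
    else if p ∈ S then fiScan rest (PySem.Set.discard S p) (some p)
    else fiScan rest S w

-- "for i, page in enumerate(f): if page in remaining: return i"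
def fiFind : List Int → PySem.Set Int → Int → Option Int
  | [], _, _ => none
  | p :: rest, S, i => if p ∈ S then some i else fiFind rest S (i + 1)

def farthest_index_alt (f : List Int) (pages : List Int) (startindex : Int) : Int :=
  let res := fiScan (PySem.List.slice pages (some startindex) none) (PySem.Set.ofList f) none
  if res.1.isEmpty then
    match res.2 with
    | some p => (((PySem.List.index? f p).getD 0 : Nat) : Int)   -- f.index(winner); winner ∈ f by construction, so Python's index cannot raise
    | none => -1
  else
    (fiFind f res.1 0).getD (-1)   -- the find loop always returns here (res.1 is a nonempty subset of f's pages); default unreachable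

-- ===== PRECONDITION & SPEC =====
def Spec_farthest_index (f : List Int) (pages : List Int) (startindex : Int) (out : Int) : Prop := out = farthest_index_alt f pages startindex
instance (f : List Int) (pages : List Int) (startindex : Int) (out : Int) : Decidable (Spec_farthest_index f pages startindex out) := by unfold Spec_farthest_index; infer_instance

-- ===== CLAIM (what is proved, stated in full; the proofs are below) =====
def Claim_equal_farthest_index : Prop := ∀ (f : List Int) (pages : List Int) (startindex : Int), Dom_farthest_index f pages startindex → Spec_farthest_index f pages startindex (farthest_index f pages startindex)

-- ===== LEMMAS AND PROOFS =====

-- first-occurrence distance of p in s (as A computes it, total form)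
def dN (s : List Int) (p : Int) : Int := ((PySem.List.index? s p).getD 0 : Nat)

-- A's loop with the slice taken once as a value
def loopA : List Int → List Int → Int → Int → Int → Int
  | [], _, _, fi, _ => fi
  | p :: rest, s, i, fi, fd =>
    if ¬ (p ∈ s) then i
    else
      if dN s p > fd then loopA rest s (i + 1) i (dN s p)
      else loopA rest s (i + 1) fi fd

theorem fiLoopA_eq_loopA (f pages : List Int) (st : Int) : ∀ i fi fd,
    fiLoopA f pages st i fi fd = loopA f (PySem.List.slice pages (some st) none) i fi fd := by
  induction f with
  | nil => intro i fi fd; rfl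
  | cons p rest ih =>
    intro i fi fd
    simp only [fiLoopA, loopA, dN]
    split_ifs with h1 h2 <;> first | rfl | rw [ih]

-- the running-argmax loop on the distance list
def amax : List Int → Int → Int → Int → Int
  | [], _, fi, _ => fi
  | d :: rest, i, fi, fd =>
    if d > fd then amax rest (i + 1) i d else amax rest (i + 1) fi fd

theorem loopA_eq_amax (f s : List Int) (hall : ∀ p ∈ f, p ∈ s) : ∀ i fi fd,
    loopA f s i fi fd = amax (f.map (dN s)) i fi fd := by
  induction f with
  | nil => intro i fi fd; rfl
  | cons p rest ih =>
    intro i fi fd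
    have hp : p ∈ s := hall p (List.mem_cons_self)
    have hrest : ∀ q ∈ rest, q ∈ s := fun q hq => hall q (List.mem_cons_of_mem _ hq)
    rw [loopA, List.map_cons, amax]
    simp only [hp, not_true_eq_false, if_false]
    split_ifs with h <;> rw [ih hrest]

theorem le_foldl_max (l : List Int) : ∀ a : Int, a ≤ l.foldl max a := by
  induction l with
  | nil => intro a; simp
  | cons d t ih => intro a; exact le_trans (le_max_left a d) (ih (max a d))

theorem mem_le_foldl_max (l : List Int) : ∀ (a d : Int), d ∈ l → d ≤ l.foldl max a := by
  induction l with
  | nil => intro a d h; simp at h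
  | cons x t ih =>
    intro a d h
    rcases List.mem_cons.mp h with h | h
    · subst h; exact le_trans (le_max_right a d) (le_foldl_max t _)
    · exact ih _ d h

theorem foldl_max_le (l : List Int) : ∀ a b : Int, a ≤ b → (∀ d ∈ l, d ≤ b) → l.foldl max a ≤ b := by
  induction l with
  | nil => intro a b hab _; simpa
  | cons x t ih =>
    intro a b hab hall
    exact ih _ b (max_le hab (hall x List.mem_cons_self)) (fun d hd => hall d (List.mem_cons_of_mem _ hd))

theorem amax_eq (ds : List Int) : ∀ i fi fd,
    amax ds i fi fd =
      if fd < ds.foldl max fd then i + ((ds.findIdx (fun d => decide (d = ds.foldl max fd)) : Nat) : Int)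
      else fi := by
  induction ds with
  | nil => intro i fi fd; simp [amax]
  | cons d t ih =>
    intro i fi fd
    rw [amax]
    by_cases h : d > fd
    · have hm : (d :: t).foldl max fd = t.foldl max d := by
        simp [List.foldl_cons, max_eq_right (le_of_lt h)]
      rw [if_pos h, ih, hm]
      have hd_le : d ≤ t.foldl max d := le_foldl_max t d
      by_cases h2 : d < t.foldl max d
      · rw [if_pos h2, if_pos (lt_trans h h2)]
        have hne : d ≠ t.foldl max d := ne_of_lt h2
        simp [List.findIdx_cons, hne]
        ring
      · have heq : t.foldl max d = d := le_antisymm (not_lt.mp h2) hd_le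
        rw [if_neg h2, if_pos (by omega)]
        simp [List.findIdx_cons, heq]
    · have hm : (d :: t).foldl max fd = t.foldl max fd := by
        simp [List.foldl_cons, max_eq_left (not_lt.mp h)]
      rw [if_neg h, ih, hm]
      by_cases h2 : fd < t.foldl max fd
      · rw [if_pos h2, if_pos h2]
        have hne : d ≠ t.foldl max fd := by omega
        simp [List.findIdx_cons, hne]
        ring
      · rw [if_neg h2, if_neg h2]

-- A returns the first missing index when one exists
theorem loopA_missing (f s : List Int) : ∀ i fi fd, (∃ p ∈ f, p ∉ s) →
    loopA f s i fi fd = i + ((f.findIdx (fun p => decide (p ∉ s)) : Nat) : Int) := by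
  induction f with
  | nil => intro i fi fd h; simp at h
  | cons p rest ih =>
    intro i fi fd h
    rw [loopA, List.findIdx_cons]
    by_cases hp : p ∈ s
    · have hrest : ∃ q ∈ rest, q ∉ s := by
        rcases h with ⟨q, hq, hqs⟩
        rcases List.mem_cons.mp hq with rfl | hq'
        · exact absurd hp hqs
        · exact ⟨q, hq', hqs⟩
      rw [if_neg (fun hc => hc hp)]
      simp only [hp, not_true_eq_false, decide_false, cond_false]
      split_ifs with h2 <;> rw [ih _ _ _ hrest] <;> push_cast <;> ring
    · rw [if_pos hp]
      simp [hp]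

-- the scan leaves exactly the members not occurring in s
theorem fiScan_fst (s : List Int) : ∀ (S : PySem.Set Int) (w : Option Int) (p : Int),
    p ∈ (fiScan s S w).1 ↔ p ∈ S ∧ p ∉ s := by
  induction s with
  | nil => intro S w p; simp [fiScan]
  | cons q t ih =>
    intro S w p
    rw [fiScan]
    by_cases hE : S.isEmpty
    · have hnil : S = [] := by simpa [List.isEmpty_iff] using hE
      subst hnil; simp
    · rw [if_neg hE]
      by_cases hq : q ∈ S
      · rw [if_pos hq, ih]
        rw [PySem.Set.mem_discard]
        constructor
        · rintro ⟨⟨h1, h2⟩, h3⟩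
          exact ⟨h1, by simp [List.mem_cons]; tauto⟩
        · rintro ⟨h1, h2⟩
          simp [List.mem_cons] at h2
          exact ⟨⟨h1, h2.1⟩, h2.2⟩
      · rw [if_neg hq, ih]
        constructor
        · rintro ⟨h1, h2⟩
          refine ⟨h1, ?_⟩
          simp [List.mem_cons]
          exact ⟨fun hpq => hq (hpq ▸ h1), h2⟩
        · rintro ⟨h1, h2⟩
          simp [List.mem_cons] at h2
          exact ⟨h1, h2.2⟩

theorem fiScan_snd_none (s : List Int) : ∀ (S : PySem.Set Int) (w : Option Int),
    (∀ p ∈ S, p ∉ s) → (fiScan s S w).2 = w := by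
  induction s with
  | nil => intro S w _; rfl
  | cons q t ih =>
    intro S w h
    rw [fiScan]
    by_cases hE : S.isEmpty
    · rw [if_pos hE]
    · rw [if_neg hE]
      have hq : ¬ q ∈ S := fun hq => (h q hq) List.mem_cons_self
      rw [if_neg hq]
      exact ih S w (fun p hp => fun hpt => (h p hp) (List.mem_cons_of_mem _ hpt))

theorem dN_cons_of_ne (t : List Int) (q p : Int) (hne : q ≠ p) (hp : p ∈ t) :
    dN (q :: t) p = dN t p + 1 := by
  unfold dN
  rw [PySem.List.index?_cons_of_ne _ hne]
  obtain ⟨k, hk⟩ := Option.isSome_iff_exists.mp ((PySem.List.index?_isSome_iff t p).mpr hp)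
  rw [hk]
  simp

theorem dN_nonneg (s : List Int) (p : Int) : 0 ≤ dN s p := by
  unfold dN; positivity

-- the winner of the scan is a member with maximal first-occurrence distance
theorem fiScan_snd_ex (s : List Int) : ∀ (S : PySem.Set Int) (w : Option Int),
    (∃ p ∈ S, p ∈ s) →
    ∃ q, (fiScan s S w).2 = some q ∧ q ∈ S ∧ q ∈ s ∧ ∀ r ∈ S, r ∈ s → dN s r ≤ dN s q := by
  induction s with
  | nil => intro S w h; simp at h
  | cons x t ih =>
    intro S w h
    have hE : ¬ S.isEmpty := by
      rcases h with ⟨p, hp, _⟩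
      simp [List.isEmpty_iff]
      exact List.ne_nil_of_mem hp
    rw [fiScan, if_neg hE]
    by_cases hx : x ∈ S
    · rw [if_pos hx]
      by_cases hex : ∃ p ∈ PySem.Set.discard S x, p ∈ t
      · obtain ⟨q, hq1, hq2, hq3, hq4⟩ := ih (PySem.Set.discard S x) (some x) hex
        rw [PySem.Set.mem_discard] at hq2
        refine ⟨q, hq1, hq2.1, List.mem_cons_of_mem _ hq3, ?_⟩
        intro r hr hrs
        by_cases hrx : r = x
        · have h0 : dN (x :: t) r = 0 := by
            rw [hrx]; unfold dN; rw [PySem.List.index?_cons_self]; rfl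
          rw [h0, dN_cons_of_ne t x q hq2.2.symm hq3]
          have := dN_nonneg t q; omega
        · have hrt : r ∈ t := by
            rcases List.mem_cons.mp hrs with h' | h'
            · exact absurd h' hrx
            · exact h'
          rw [dN_cons_of_ne t x r (fun e => hrx e.symm) hrt,
              dN_cons_of_ne t x q hq2.2.symm hq3]
          have := hq4 r ((PySem.Set.mem_discard _ _ _).mpr ⟨hr, hrx⟩) hrt
          omega
      · have hex' : ∀ p ∈ PySem.Set.discard S x, p ∉ t :=
          fun p hp hpt => hex ⟨p, hp, hpt⟩
        have : (fiScan t (PySem.Set.discard S x) (some x)).2 = some x :=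
          fiScan_snd_none t _ _ hex'
        refine ⟨x, this, hx, List.mem_cons_self, ?_⟩
        intro r hr hrs
        by_cases hrx : r = x
        · subst hrx; omega
        · have hrt : r ∈ t := by
            rcases List.mem_cons.mp hrs with h' | h'
            · exact absurd h' hrx
            · exact h'
          exact absurd hrt (hex' r ((PySem.Set.mem_discard _ _ _).mpr ⟨hr, hrx⟩))
    · rw [if_neg hx]
      have hex : ∃ p ∈ S, p ∈ t := by
        rcases h with ⟨p, hp, hps⟩
        rcases List.mem_cons.mp hps with rfl | h'
        · exact absurd hp hx
        · exact ⟨p, hp, h'⟩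
      obtain ⟨q, hq1, hq2, hq3, hq4⟩ := ih S w hex
      refine ⟨q, hq1, hq2, List.mem_cons_of_mem _ hq3, ?_⟩
      intro r hr hrs
      have hqx : q ≠ x := fun e => hx (e ▸ hq2)
      rcases List.mem_cons.mp hrs with h' | hrt
      · exact absurd (h' ▸ hr) hx
      · rw [dN_cons_of_ne t x r (fun e => hx (e.symm ▸ hr)) hrt,
            dN_cons_of_ne t x q (fun e => hqx e.symm) hq3]
        have := hq4 r hr hrt
        omega

theorem fiScan_empty (s : List Int) (w : Option Int) : fiScan s [] w = ([], w) := by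
  cases s with
  | nil => rfl
  | cons x t => rw [fiScan]; simp

-- the finder over f agrees with findIdx of "not in s"
theorem fiFind_eq (s : List Int) (S : PySem.Set Int) :
    ∀ (f : List Int) (i : Int), (∀ p ∈ f, (p ∈ S ↔ p ∉ s)) → (∃ p ∈ f, p ∉ s) →
    fiFind f S i = some (i + ((f.findIdx (fun p => decide (p ∉ s)) : Nat) : Int)) := by
  intro f
  induction f with
  | nil => intro i _ h; simp at h
  | cons p rest ih =>
    intro i hmem hex
    rw [fiFind, List.findIdx_cons]
    by_cases hp : p ∉ s
    · have : p ∈ S := (hmem p List.mem_cons_self).mpr hp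
      rw [if_pos this]
      simp [hp]
    · have hS : ¬ p ∈ S := fun h => hp ((hmem p List.mem_cons_self).mp h)
      rw [if_neg hS]
      have hrest : ∃ q ∈ rest, q ∉ s := by
        rcases hex with ⟨q, hq, hqs⟩
        rcases List.mem_cons.mp hq with rfl | hq'
        · exact absurd hqs hp
        · exact ⟨q, hq', hqs⟩
      rw [ih _ (fun q hq => hmem q (List.mem_cons_of_mem _ hq)) hrest]
      have hps : p ∈ s := not_not.mp hp
      simp only [hps, not_true_eq_false, decide_false, cond_false]
      congr 1
      push_cast; ring

-- dN is injective on members of s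
theorem dN_inj (s : List Int) (p q : Int) (hp : p ∈ s) (hq : q ∈ s) (h : dN s p = dN s q) : p = q := by
  obtain ⟨kp, hkp⟩ := Option.isSome_iff_exists.mp ((PySem.List.index?_isSome_iff s p).mpr hp)
  obtain ⟨kq, hkq⟩ := Option.isSome_iff_exists.mp ((PySem.List.index?_isSome_iff s q).mpr hq)
  obtain ⟨hlp, hgp, _⟩ := PySem.List.getElem_of_index?_eq_some hkp
  obtain ⟨hlq, hgq, _⟩ := PySem.List.getElem_of_index?_eq_some hkq
  have : kp = kq := by
    unfold dN at h
    rw [hkp, hkq] at h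
    simpa using h
  subst this
  rw [← hgp, ← hgq]

-- (index? f q).getD 0 = findIdx of equality, when q ∈ f
theorem index?_getD_eq_findIdx (f : List Int) (q : Int) (hq : q ∈ f) :
    ((PySem.List.index? f q).getD 0 : Nat) = f.findIdx (fun p => decide (p = q)) := by
  induction f with
  | nil => simp at hq
  | cons x rest ih =>
    rw [List.findIdx_cons]
    by_cases hx : x = q
    · subst hx
      rw [PySem.List.index?_cons_self]
      simp
    · rw [PySem.List.index?_cons_of_ne _ hx]
      have hq' : q ∈ rest := by
        rcases List.mem_cons.mp hq with h | h
        · exact absurd h.symm hx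
        · exact h
      obtain ⟨k, hk⟩ := Option.isSome_iff_exists.mp ((PySem.List.index?_isSome_iff rest q).mpr hq')
      simp only [hx, decide_false, cond_false]
      rw [hk]
      simp only [Option.map_some, Option.getD_some]
      rw [← ih hq', hk]
      simp

theorem findIdx_congr_mem {α : Type} (l : List α) (p q : α → Bool)
    (h : ∀ x ∈ l, p x = q x) : l.findIdx p = l.findIdx q := by
  induction l with
  | nil => rfl
  | cons x t ih =>
    rw [List.findIdx_cons, List.findIdx_cons, h x List.mem_cons_self,
        ih (fun y hy => h y (List.mem_cons_of_mem _ hy))]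

-- the core equivalence, with the slice abstracted to s
theorem main_eq (f s : List Int) :
    loopA f s 0 (-1) (-1) =
      (let res := fiScan s (PySem.Set.ofList f) none
       if res.1.isEmpty then
         match res.2 with
         | some p => (((PySem.List.index? f p).getD 0 : Nat) : Int)
         | none => -1
       else (fiFind f res.1 0).getD (-1)) := by
  simp only []
  by_cases hmiss : ∃ p ∈ f, p ∉ s
  · -- some frame page is missing from the suffix: both return its first index
    have hne : ¬ (fiScan s (PySem.Set.ofList f) none).1.isEmpty := by
      rcases hmiss with ⟨p, hp, hps⟩
      rw [List.isEmpty_iff]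
      intro hnil
      have := (fiScan_fst s (PySem.Set.ofList f) none p).mpr ⟨(PySem.Set.mem_ofList _ _).mpr hp, hps⟩
      rw [hnil] at this
      simp at this
    rw [if_neg hne]
    rw [fiFind_eq s _ f 0
        (fun p _ => by rw [fiScan_fst]; simp [PySem.Set.mem_ofList]; tauto) hmiss]
    rw [loopA_missing f s 0 (-1) (-1) hmiss]
    simp
  · have hall0 : ∀ p ∈ f, p ∈ s := fun p hp =>
      not_not.mp (fun hns => hmiss ⟨p, hp, hns⟩)
    -- every frame page occurs in the suffix
    have hE : (fiScan s (PySem.Set.ofList f) none).1.isEmpty := by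
      rw [List.isEmpty_iff, List.eq_nil_iff_forall_not_mem]
      intro p hp
      rw [fiScan_fst] at hp
      exact hp.2 (hall0 p ((PySem.Set.mem_ofList _ _).mp hp.1))
    rw [if_pos hE]
    cases f with
    | nil =>
      rw [PySem.Set.ofList_nil, fiScan_empty]
      rfl
    | cons a rest =>
      have hex : ∃ p ∈ PySem.Set.ofList (a :: rest), p ∈ s := by
        refine ⟨a, (PySem.Set.mem_ofList _ _).mpr List.mem_cons_self, hall0 a List.mem_cons_self⟩
      obtain ⟨q, hq1, hq2, hq3, hq4⟩ := fiScan_snd_ex s _ none hex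
      rw [PySem.Set.mem_ofList] at hq2
      have hall : ∀ p ∈ (a :: rest), p ∈ s := hall0
      have key : loopA (a :: rest) s 0 (-1) (-1)
          = (((PySem.List.index? (a :: rest) q).getD 0 : Nat) : Int) := by
        rw [loopA_eq_amax _ s hall, amax_eq]
        set ds := (a :: rest).map (dN s) with hds
        have hm_eq : ds.foldl max (-1) = dN s q := by
          apply le_antisymm
          · apply foldl_max_le
            · have := dN_nonneg s q; omega
            · intro d hd
              rw [hds] at hd
              obtain ⟨p, hp, rfl⟩ := List.mem_map.mp hd
              exact hq4 p ((PySem.Set.mem_ofList _ _).mpr hp) (hall p hp)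
          · exact mem_le_foldl_max ds (-1) (dN s q) (List.mem_map.mpr ⟨q, hq2, rfl⟩)
        have hpos : (-1 : Int) < ds.foldl max (-1) := by
          rw [hm_eq]; have := dN_nonneg s q; omega
        rw [if_pos hpos, hm_eq]
        rw [index?_getD_eq_findIdx _ q hq2]
        have : ds.findIdx (fun d => decide (d = dN s q))
             = (a :: rest).findIdx (fun p => decide (p = q)) := by
          rw [hds, List.findIdx_map]
          apply findIdx_congr_mem
          intro x hx
          simp only [Function.comp]
          by_cases hxq : x = q
          · simp [hxq]
          · have : dN s x ≠ dN s q := fun h => hxq (dN_inj s x q (hall x hx) hq3 h)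
            simp [hxq, this]
        rw [this]
        simp
      rw [hq1]
      exact key

-- ===== VERDICT (by name: the statement is the Claim_ definition above) =====
theorem farthest_index_spec : Claim_equal_farthest_index := by
  intro f pages st _
  unfold Spec_farthest_index farthest_index farthest_index_alt
  rw [fiLoopA_eq_loopA]
  exact main_eq f (PySem.List.slice pages (some st) none)
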